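-- pv_equiv track=rewrite | github.com/mikeisen1/8-puzzle-solver | main.py | validPuzzle
-- ===== SOURCE A (Python) =====
-- def validPuzzle(lst):
--     #going through numbers 0-8.
--     for i in range(9):
--         inLst = False
--         for j in range(len(lst)):
--             if i in lst[j]:
--                 inLst = True
--                 break
--         if not inLst:
--             return False
--     return True
-- ===== SOURCE B (Python) =====
-- def validPuzzle(lst):
--     present = {x for row in lst for x in row}
--     return set(range(9)).issubset(present)
-- ===== Notes on version B (the rewrite author's own statement) =====
-- stated objective: simpler
-- what changed: Instead of scanning the rows once per target number 0-8 with an early-exit double loop, B flattens the grid into a set once and does a single subset test against set(range(9)).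
import Mathlib
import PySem

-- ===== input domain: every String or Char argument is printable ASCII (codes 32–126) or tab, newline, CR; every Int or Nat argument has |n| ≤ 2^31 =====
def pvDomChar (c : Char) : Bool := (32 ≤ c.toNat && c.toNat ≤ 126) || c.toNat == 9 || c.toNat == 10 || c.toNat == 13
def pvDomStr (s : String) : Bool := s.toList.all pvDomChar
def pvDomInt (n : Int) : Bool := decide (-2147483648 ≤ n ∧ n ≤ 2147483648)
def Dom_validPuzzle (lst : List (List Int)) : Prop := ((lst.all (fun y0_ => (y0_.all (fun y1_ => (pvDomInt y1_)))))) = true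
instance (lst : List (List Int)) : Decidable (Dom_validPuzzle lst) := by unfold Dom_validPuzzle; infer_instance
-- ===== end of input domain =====

-- ===== PORT A =====
-- A: for each i in range(9), scan rows for membership with early exit (ported as all/any).
def validPuzzle (lst : List (List Int)) : Bool :=
  (PySem.List.pyRange 0 9 1).all fun i =>
    lst.any fun row => row.contains i

-- ===== PORT B =====
-- B: flatten the grid into a set once, then one subset test against set(range(9)).
def validPuzzle_alt (lst : List (List Int)) : Bool :=
  PySem.Set.issubset (PySem.Set.ofList ((List.range 9).map Int.ofNat))
    (PySem.Set.ofList lst.flatten)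

-- ===== PRECONDITION & SPEC =====
def Spec_validPuzzle (lst : List (List Int)) (out : Bool) : Prop := out = validPuzzle_alt lst
instance (lst : List (List Int)) (out : Bool) : Decidable (Spec_validPuzzle lst out) := by unfold Spec_validPuzzle; infer_instance

-- ===== CLAIM (what is proved, stated in full; the proofs are below) =====
def Claim_equal_validPuzzle : Prop := ∀ (lst : List (List Int)), Dom_validPuzzle lst → Spec_validPuzzle lst (validPuzzle lst)

-- ===== LEMMAS AND PROOFS =====

-- ===== VERDICT (by name: the statement is the Claim_ definition above) =====
theorem validPuzzle_spec : Claim_equal_validPuzzle := by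
  intro lst _
  unfold Spec_validPuzzle validPuzzle validPuzzle_alt
  rw [Bool.eq_iff_iff]
  simp [PySem.Set.issubset_iff, PySem.Set.mem_ofList, List.mem_flatten,
    show PySem.List.pyRange 0 9 1 = [0,1,2,3,4,5,6,7,8] from by decide]
  constructor
  · rintro ⟨h0, h1, h2, h3, h4, h5, h6, h7, h8⟩ a ha
    interval_cases a <;> simpa
  · intro h
    refine ⟨?_, ?_, ?_, ?_, ?_, ?_, ?_, ?_, ?_⟩ <;>
      first
        | simpa using h 0 (by norm_num)
        | simpa using h 1 (by norm_num)
        | simpa using h 2 (by norm_num)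
        | simpa using h 3 (by norm_num)
        | simpa using h 4 (by norm_num)
        | simpa using h 5 (by norm_num)
        | simpa using h 6 (by norm_num)
        | simpa using h 7 (by norm_num)
        | simpa using h 8 (by norm_num)
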